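-- pv_equiv track=rewrite | github.com/nishshanka20/Leet_code_test | minimize_XOR.py | minimizeXor
-- ===== SOURCE A (Python) =====
-- def minimizeXor(num1: int, num2: int) -> int:
--     count1 = bin(num2).count('1')
--
--     x = 0
--
--     for i in range(31, -1, -1):
--         if num1 & (1 << i):
--             if count1 > 0:
--                 x |= (1 << i)
--                 count1 -= 1
--
--     for i in range(32):
--         if count1 == 0:
--             break
--         if not (x & (1 << i)):
--             x |= (1 << i)
--             count1 -= 1
--
--     return x
-- ===== SOURCE B (Python) =====
-- def minimizeXor(num1: int, num2: int) -> int: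
--     # Brian-Kernighan bit adjustments instead of two 32-bit position scans.
--     x = num1 & 0xFFFFFFFF
--     c = bin(x).count('1')
--     k = bin(num2).count('1')
--     while c > k:
--         x &= x - 1          # clear lowest set bit
--         c -= 1
--     while c < k and x != 0xFFFFFFFF:
--         x |= x + 1          # set lowest unset bit
--         c += 1
--     return x
-- ===== Notes on version B (the rewrite author's own statement) =====
-- stated objective: simpler
-- what changed: Replaces A's two fixed 32-position scans (high-to-low keep, low-to-high fill) with Brian-Kernighan while-loops that clear the lowest set bit (x &= x-1) or set the lowest unset bit (x |= x+1) only as many times as the popcounts differ.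
import Mathlib
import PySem

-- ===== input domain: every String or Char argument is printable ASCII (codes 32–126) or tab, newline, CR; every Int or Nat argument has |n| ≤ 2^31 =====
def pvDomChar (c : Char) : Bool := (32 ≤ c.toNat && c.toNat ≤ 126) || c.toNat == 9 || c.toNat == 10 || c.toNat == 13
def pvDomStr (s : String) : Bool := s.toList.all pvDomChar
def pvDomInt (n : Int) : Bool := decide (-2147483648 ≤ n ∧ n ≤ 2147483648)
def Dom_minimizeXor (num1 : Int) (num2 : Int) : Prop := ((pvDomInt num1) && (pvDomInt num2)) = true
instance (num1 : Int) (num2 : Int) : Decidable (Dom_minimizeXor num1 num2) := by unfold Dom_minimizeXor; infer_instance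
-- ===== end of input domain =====

-- B replaces A's two fixed 32-bit-position scans by Brian-Kernighan bit adjustments
-- (clear lowest set bit / set lowest unset bit until the popcounts match); objective: simpler, no speed claim.


-- ===== PORT A =====
def minimizeXorLoop2 : List Int → Int → Int → Int
  | [], x, _ => x
  | i :: rest, x, c =>
    if c = 0 then x
    else if PySem.Int.band x ((1 : Int) <<< i.toNat) = 0 then
      minimizeXorLoop2 rest (PySem.Int.bor x ((1 : Int) <<< i.toNat)) (c - 1)
    else minimizeXorLoop2 rest x c

-- bin(num2).count('1') is PySem.Int.bitCount (Python-exact, reads |num2|)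
def minimizeXor (num1 : Int) (num2 : Int) : Int :=
  let count1 : Int := (PySem.Int.bitCount num2 : Int)
  let st := (PySem.List.pyRange 31 (-1) (-1)).foldl
    (fun (st : Int × Int) i =>
      if PySem.Int.band num1 ((1 : Int) <<< i.toNat) ≠ 0 then
        (if st.2 > 0 then (PySem.Int.bor st.1 ((1 : Int) <<< i.toNat), st.2 - 1) else st)
      else st) ((0 : Int), count1)
  minimizeXorLoop2 (PySem.List.pyRange 0 32 1) st.1 st.2

-- ===== PORT B =====
-- `while c > k: x &= x - 1; c -= 1` (returns the final x and c)
def minimizeXorClear (x c k : Int) : Int × Int :=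
  if h : c > k then minimizeXorClear (PySem.Int.band x (x - 1)) (c - 1) k else (x, c)
  termination_by (c - k).toNat
  decreasing_by omega

-- `while c < k and x != 0xFFFFFFFF: x |= x + 1; c += 1`
def minimizeXorFill (x c k : Int) : Int :=
  if h : c < k ∧ x ≠ 4294967295 then minimizeXorFill (PySem.Int.bor x (x + 1)) (c + 1) k else x
  termination_by (k - c).toNat
  decreasing_by omega

def minimizeXor_alt (num1 : Int) (num2 : Int) : Int :=
  let x := PySem.Int.band num1 4294967295
  let k : Int := (PySem.Int.bitCount num2 : Int)
  let st := minimizeXorClear x (PySem.Int.bitCount x : Int) k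
  minimizeXorFill st.1 st.2 k

-- ===== PRECONDITION & SPEC =====
def Spec_minimizeXor (num1 : Int) (num2 : Int) (out : Int) : Prop := out = minimizeXor_alt num1 num2
instance (num1 : Int) (num2 : Int) (out : Int) : Decidable (Spec_minimizeXor num1 num2 out) := by unfold Spec_minimizeXor; infer_instance

-- ===== CLAIM (what is proved, stated in full; the proofs are below) =====
def Claim_equal_minimizeXor : Prop := ∀ (num1 : Int) (num2 : Int), Dom_minimizeXor num1 num2 → Spec_minimizeXor num1 num2 (minimizeXor num1 num2)

-- ===== LEMMAS AND PROOFS =====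


theorem pv_testBit_one (j : Nat) : (1:Nat).testBit j = decide (j = 0) := by
  have := Nat.testBit_two_pow (n := 0) (m := j)
  simpa [eq_comm] using this
def pvClear (x : Nat) : Nat := x &&& (x - 1)
def pvFill (x : Nat) : Nat := x ||| (x + 1)

theorem pv_lor_two_pow_add {b i : Nat} (h : b < 2 ^ i) : 2 ^ i ||| b = 2 ^ i + b := by
  apply Nat.eq_of_testBit_eq
  intro j
  have h2 : 2 ^ i + b = 2 ^ i * 1 + b := by ring
  rw [h2, Nat.testBit_two_pow_mul_add 1 h, Nat.testBit_lor, Nat.testBit_two_pow]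
  rcases lt_trichotomy j i with hj | hj | hj
  · simp [hj, Nat.ne_of_gt hj]
  · subst hj
    simp [Nat.testBit_lt_two_pow h]
  · have : b.testBit j = false := Nat.testBit_lt_two_pow (lt_of_lt_of_le h (Nat.pow_le_pow_right (by norm_num) hj.le))
    simp [this, Nat.ne_of_lt hj, Nat.lt_asymm hj, pv_testBit_one]
    omega

theorem pv_clear_step (a i : Nat) : pvClear (2 ^ (i + 1) * a + 2 ^ i) = 2 ^ (i + 1) * a := by
  have hpi : (2:Nat) ^ i < 2 ^ (i+1) := by
    have := Nat.pow_lt_pow_right (a := 2) (by norm_num) (Nat.lt_succ_self i); omega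
  have hsub : 2 ^ (i + 1) * a + 2 ^ i - 1 = 2 ^ (i + 1) * a + (2 ^ i - 1) := by
    have : (1:Nat) ≤ 2 ^ i := Nat.one_le_two_pow; omega
  apply Nat.eq_of_testBit_eq
  intro j
  rw [pvClear, hsub, Nat.testBit_land,
      Nat.testBit_two_pow_mul_add a hpi,
      Nat.testBit_two_pow_mul_add a (show 2^i - 1 < 2^(i+1) by omega),
      show 2 ^ (i+1) * a = 2 ^ (i+1) * a + 0 by ring,
      Nat.testBit_two_pow_mul_add a (show 0 < 2^(i+1) by positivity)]
  split
  · next hj =>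
    simp [Nat.testBit_two_pow, Nat.testBit_two_pow_sub_one, Nat.zero_testBit]
    omega
  · simp

theorem pv_fill_step (a i : Nat) :
    pvFill (2 ^ (i + 1) * a + (2 ^ i - 1)) = 2 ^ (i + 1) * a + (2 ^ (i + 1) - 1) := by
  have h1 : (1:Nat) ≤ 2 ^ i := Nat.one_le_two_pow
  have hpi : (2:Nat) ^ i < 2 ^ (i+1) := by
    have := Nat.pow_lt_pow_right (a := 2) (by norm_num) (Nat.lt_succ_self i); omega
  have hadd : 2 ^ (i + 1) * a + (2 ^ i - 1) + 1 = 2 ^ (i + 1) * a + 2 ^ i := by omega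
  apply Nat.eq_of_testBit_eq
  intro j
  rw [pvFill, hadd, Nat.testBit_lor,
      Nat.testBit_two_pow_mul_add a (show 2^i - 1 < 2^(i+1) by omega),
      Nat.testBit_two_pow_mul_add a hpi,
      Nat.testBit_two_pow_mul_add a (show 2^(i+1) - 1 < 2^(i+1) by omega)]
  split
  · next hj =>
    simp [Nat.testBit_two_pow, Nat.testBit_two_pow_sub_one]
    by_cases h2 : j < i <;> by_cases h3 : i = j <;> simp_all <;> omega
  · simp

theorem pv_decomp_lsb {x : Nat} (h : x ≠ 0) : ∃ a i, x = 2 ^ (i + 1) * a + 2 ^ i := by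
  induction x using Nat.strong_induction_on with
  | _ x ih =>
    rcases Nat.even_or_odd x with he | ho
    · have hx2 : x / 2 ≠ 0 := by
        rcases he with ⟨y, hy⟩; omega
      obtain ⟨a, i, hai⟩ := ih (x / 2) (by omega) hx2
      refine ⟨a, i + 1, ?_⟩
      have hx : x = 2 * (x / 2) := by rcases he with ⟨y, hy⟩; omega
      rw [hx, hai]
      ring
    · refine ⟨x / 2, 0, ?_⟩
      rcases ho with ⟨y, hy⟩
      simp
      omega

theorem pv_decomp_lowzero {w x : Nat} (hx : x < 2 ^ w) (hne : x ≠ 2 ^ w - 1) :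
    ∃ a i, i < w ∧ x = 2 ^ (i + 1) * a + (2 ^ i - 1) := by
  induction w generalizing x with
  | zero => omega
  | succ w ih =>
    have h2 : (2:Nat) ^ (w + 1) = 2 * 2 ^ w := by ring
    rcases Nat.even_or_odd x with he | ho
    · refine ⟨x / 2, 0, by omega, ?_⟩
      rcases he with ⟨y, hy⟩
      simp
      omega
    · rcases ho with ⟨y, hy⟩
      have h1 : (1:Nat) ≤ 2 ^ w := Nat.one_le_two_pow
      obtain ⟨a, i, hiw, hai⟩ := ih (x := y) (by omega) (by omega)
      refine ⟨a, i + 1, by omega, ?_⟩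
      have hg : (2:Nat) ^ (i + 1 + 1) * a = 2 * (2 ^ (i + 1) * a) := by ring
      have hp : (2:Nat) ^ (i + 1) = 2 * 2 ^ i := by ring
      have h1i : (1:Nat) ≤ 2 ^ i := Nat.one_le_two_pow
      omega

theorem pv_compl_testBit {n v i : Nat} (hv : v < 2 ^ n) (hi : i < n) :
    (2 ^ n - 1 - v).testBit i = ! v.testBit i := by
  induction n generalizing v i with
  | zero => omega
  | succ n ih =>
    have h2 : (2:Nat) ^ (n + 1) = 2 * 2 ^ n := by ring
    cases i with
    | zero =>
      simp only [Nat.testBit_zero]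
      have := Nat.mod_two_eq_zero_or_one v
      rcases this with h | h <;> simp [h] <;> omega
    | succ i =>
      rw [Nat.testBit_add_one, Nat.testBit_add_one,
          show (2 ^ (n + 1) - 1 - v) / 2 = 2 ^ n - 1 - v / 2 by omega]
      exact ih (by omega) (by omega)

def pvPc (n : Nat) : Nat := PySem.Int.bitCount (n : Int)

theorem pvPc_zero : pvPc 0 = 0 := by decide

theorem pvPc_rec {m : Nat} (h : 0 < m) : pvPc m = m % 2 + pvPc (m / 2) := by
  exact PySem.Int.bitCount_natCast h

theorem pvPc_mul_add {s a b : Nat} (h : b < 2 ^ s) : pvPc (2 ^ s * a + b) = pvPc a + pvPc b := by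
  induction s generalizing b with
  | zero =>
    interval_cases b
    simp [pvPc_zero]
  | succ s ih =>
    by_cases hz : 2 ^ (s + 1) * a + b = 0
    · obtain ⟨hmul, hb0⟩ := Nat.add_eq_zero.mp hz
      have ha0 : a = 0 := by
        rcases Nat.mul_eq_zero.mp hmul with hp | ha
        · exact absurd hp (by positivity)
        · exact ha
      simp [ha0, hb0, pvPc_zero]
    · rw [pvPc_rec (by omega)]
      have h2 : (2:Nat) ^ (s + 1) * a = 2 * (2 ^ s * a) := by ring
      have hdiv : (2 ^ (s + 1) * a + b) / 2 = 2 ^ s * a + b / 2 := by omega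
      have hmod : (2 ^ (s + 1) * a + b) % 2 = b % 2 := by omega
      rw [hdiv, hmod, ih (by omega)]
      by_cases hb : b = 0
      · simp [hb, pvPc_zero]
      · rw [pvPc_rec (show 0 < b by omega)]
        omega

theorem pvPc_two_pow_sub_one (n : Nat) : pvPc (2 ^ n - 1) = n := by
  induction n with
  | zero => simpa using pvPc_zero
  | succ n ih =>
    have h2 : (2:Nat) ^ (n + 1) = 2 * 2 ^ n := by ring
    have h1 : (1:Nat) ≤ 2 ^ n := Nat.one_le_two_pow
    rw [pvPc_rec (by omega), show (2 ^ (n+1) - 1) % 2 = 1 by omega,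
        show (2 ^ (n+1) - 1) / 2 = 2 ^ n - 1 by omega, ih]
    omega

theorem pvPc_countP_range {w m : Nat} (h : m < 2 ^ w) :
    pvPc m = (List.range w).countP (fun i => m.testBit i) := by
  induction w generalizing m with
  | zero =>
    interval_cases m
    simpa using pvPc_zero
  | succ w ih =>
    rw [List.range_succ_eq_map, List.countP_cons, List.countP_map]
    have h2 : (2:Nat) ^ (w + 1) = 2 * 2 ^ w := by ring
    by_cases hm : m = 0
    · subst hm
      simp [pvPc_zero, Nat.zero_testBit]
    · have hc : List.countP ((fun i => m.testBit i) ∘ Nat.succ) (List.range w)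
          = List.countP (fun i => (m / 2).testBit i) (List.range w) := by
        apply List.countP_congr
        intro i _
        simp [Nat.testBit_add_one]
      rw [pvPc_rec (by omega), ih (m := m / 2) (by omega), hc]
      rcases Nat.mod_two_eq_zero_or_one m with hpar | hpar <;>
        simp [Nat.testBit_zero, hpar] <;> omega

def pvTake : List Nat → Nat → Nat → Nat
  | [], _, _ => 0
  | i :: L, m, k =>
    if m.testBit i then
      (if 0 < k then 2 ^ i ||| pvTake L m (k - 1) else pvTake L m k)
    else pvTake L m k

def pvCnt (L : List Nat) (m : Nat) : Nat := L.countP (fun i => m.testBit i)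

theorem pvTake_zero (L : List Nat) (m : Nat) : pvTake L m 0 = 0 := by
  induction L with
  | nil => rfl
  | cons i L ih => simp [pvTake, ih]

theorem pvTake_congr {L : List Nat} {m m' : Nat} (h : ∀ j ∈ L, m.testBit j = m'.testBit j) :
    ∀ k, pvTake L m k = pvTake L m' k := by
  induction L with
  | nil => intro k; rfl
  | cons i L ih =>
    intro k
    have hi := h i (by simp)
    have hL : ∀ j ∈ L, m.testBit j = m'.testBit j := fun j hj => h j (by simp [hj])
    simp only [pvTake, hi, ih hL]

theorem pvTake_lt {L : List Nat} {i : Nat} (h : ∀ j ∈ L, j < i) (m k : Nat) :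
    pvTake L m k < 2 ^ i := by
  induction L generalizing k with
  | nil => simpa [pvTake] using Nat.pos_pow_of_pos i (by norm_num)
  | cons j L ih =>
    have hj : j < i := h j (by simp)
    have hL : ∀ j' ∈ L, j' < i := fun j' hj' => h j' (by simp [hj'])
    simp only [pvTake]
    split
    · split
      · exact Nat.or_lt_two_pow (Nat.pow_lt_pow_right (by norm_num) hj) (ih hL _)
      · exact ih hL _
    · exact ih hL _

theorem pvTake_ne_zero {L : List Nat} {m k : Nat} (hk : 0 < k) (hc : 0 < pvCnt L m) :
    pvTake L m k ≠ 0 := by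
  induction L generalizing k with
  | nil => simp [pvCnt] at hc
  | cons i L ih =>
    simp only [pvTake]
    by_cases hb : m.testBit i
    · simp only [hb, if_pos, hk, if_true]
      intro hcontra
      have hbit : ((2 ^ i ||| pvTake L m (k - 1)).testBit i) = true := by
        simp [Nat.testBit_lor, Nat.testBit_two_pow]
      rw [hcontra] at hbit
      simp [Nat.zero_testBit] at hbit
    · have hc' : 0 < pvCnt L m := by
        simp [pvCnt, List.countP_cons, hb] at hc ⊢
        omega
      simp [hb]
      exact ih hk hc'

theorem pv_desc_succ (w : Nat) :
    (List.range (w + 1)).reverse = w :: (List.range w).reverse := by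
  simp [List.range_succ]

theorem pv_div_two_pow_lt {w m : Nat} (hm : m < 2 ^ (w + 1)) : m / 2 ^ w < 2 := by
  rw [Nat.div_lt_iff_lt_mul (by positivity)]
  have : (2:Nat) ^ (w + 1) = 2 ^ w * 2 := by ring
  omega

theorem pv_testBit_high_true {w m : Nat} (hm : m < 2 ^ (w + 1)) (hb : m.testBit w = true) :
    m = 2 ^ w + m % 2 ^ w := by
  have h2 := pv_div_two_pow_lt hm
  have hb' := hb
  rw [Nat.testBit_eq_decide_div_mod_eq] at hb'
  have hodd : m / 2 ^ w % 2 = 1 := of_decide_eq_true hb'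
  have hq : m / 2 ^ w = 1 := by generalize m / 2 ^ w = q at h2 hodd ⊢; omega
  have hdm := Nat.div_add_mod m (2 ^ w)
  rw [hq, Nat.mul_one] at hdm
  omega

theorem pv_testBit_high_false {w m : Nat} (hm : m < 2 ^ (w + 1)) (hb : m.testBit w = false) :
    m < 2 ^ w := by
  have h2 := pv_div_two_pow_lt hm
  have hb' := hb
  rw [Nat.testBit_eq_decide_div_mod_eq] at hb'
  have hodd : ¬ (m / 2 ^ w % 2 = 1) := of_decide_eq_false hb'
  have hq : m / 2 ^ w = 0 := by generalize m / 2 ^ w = q at h2 hodd ⊢; omega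
  have hdm := Nat.div_add_mod m (2 ^ w)
  rw [hq, Nat.mul_zero] at hdm
  have hmlt := Nat.mod_lt m (y := 2 ^ w) (by positivity)
  omega

theorem pvCnt_cons (i : Nat) (L : List Nat) (m : Nat) :
    pvCnt (i :: L) m = pvCnt L m + (if m.testBit i then 1 else 0) := by
  simp [pvCnt, List.countP_cons]

theorem pvTake_all {w m k : Nat} (hm : m < 2 ^ w) (hk : pvCnt (List.range w).reverse m ≤ k) :
    pvTake (List.range w).reverse m k = m := by
  induction w generalizing m k with
  | zero => interval_cases m; simp [pvTake]
  | succ w ih =>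
    rw [pv_desc_succ] at hk ⊢
    rw [pvCnt_cons] at hk
    have hmod : ∀ j ∈ (List.range w).reverse, m.testBit j = (m % 2 ^ w).testBit j := by
      intro j hj
      rw [List.mem_reverse, List.mem_range] at hj
      rw [Nat.testBit_mod_two_pow]
      simp only [hj, decide_true, Bool.true_and]
    have hcnt : pvCnt (List.range w).reverse m = pvCnt (List.range w).reverse (m % 2 ^ w) := by
      apply List.countP_congr
      intro j hj
      rw [hmod j hj]
    have hmlt : m % 2 ^ w < 2 ^ w := Nat.mod_lt _ (by positivity)
    simp only [pvTake]
    by_cases hb : m.testBit w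
    · rw [if_pos hb]
      rw [if_pos hb] at hk
      have hmeq := pv_testBit_high_true hm hb
      have hk0 : 0 < k := by omega
      rw [if_pos hk0, pvTake_congr hmod]
      have hle : pvCnt (List.range w).reverse (m % 2 ^ w) ≤ k - 1 := by
        rw [← hcnt]; omega
      rw [ih hmlt hle, pv_lor_two_pow_add hmlt]
      omega
    · rw [if_neg (by simp [hb])]
      rw [if_neg hb] at hk
      have hmm : m % 2 ^ w = m := Nat.mod_eq_of_lt (pv_testBit_high_false hm (by simpa using hb))
      rw [pvTake_congr hmod, hmm]
      exact ih (hmm ▸ hmlt) (by omega)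

theorem pv_clearstep_two_pow (i : Nat) : pvClear (2 ^ i) = 0 := by
  simpa using pv_clear_step 0 i

theorem pv_clear_shift {T i : Nat} (h0 : T ≠ 0) (hT : T < 2 ^ i) :
    pvClear (2 ^ i ||| T) = 2 ^ i ||| pvClear T := by
  obtain ⟨a, j, hTeq⟩ := pv_decomp_lsb h0
  have hji : j < i := by
    by_contra hji
    have : (2:Nat) ^ i ≤ 2 ^ j := Nat.pow_le_pow_right (by norm_num) (by omega)
    omega
  have hpow : (2:Nat) ^ (j + 1) * 2 ^ (i - (j + 1)) = 2 ^ i := by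
    rw [← pow_add]; congr 1; omega
  have hclT : pvClear T = 2 ^ (j + 1) * a := by rw [hTeq]; exact pv_clear_step a j
  have hclTle : 2 ^ (j + 1) * a < 2 ^ i := by
    have h1 : (1:Nat) ≤ 2 ^ j := Nat.one_le_two_pow
    omega
  rw [pv_lor_two_pow_add hT, pv_lor_two_pow_add (hclT ▸ hclTle), hclT, hTeq,
      show 2 ^ i + (2 ^ (j + 1) * a + 2 ^ j) = 2 ^ (j + 1) * (a + 2 ^ (i - (j + 1))) + 2 ^ j by
        rw [Nat.mul_add, hpow]; ring,
      pv_clear_step, Nat.mul_add, hpow]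
  ring

theorem pvTake_clearstep {L : List Nat} {m k : Nat} (hL : L.Pairwise (· > ·))
    (hk : k < pvCnt L m) : pvTake L m k = pvClear (pvTake L m (k + 1)) := by
  induction L generalizing k with
  | nil => simp [pvCnt] at hk
  | cons i L ih =>
    rw [List.pairwise_cons] at hL
    obtain ⟨hi, hLp⟩ := hL
    rw [pvCnt_cons] at hk
    simp only [pvTake]
    by_cases hb : m.testBit i
    · rw [if_pos hb, if_pos hb, if_pos (by omega : 0 < k + 1)]
      cases k with
      | zero =>
        rw [if_neg (by omega), pvTake_zero, Nat.or_zero]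
        exact (pv_clearstep_two_pow i).symm
      | succ k' =>
        rw [if_pos (by omega)]
        have hcL : k' + 1 ≤ pvCnt L m := by simp [hb] at hk; omega
        have hT0 : pvTake L m (k' + 1) ≠ 0 := pvTake_ne_zero (by omega) (by omega)
        have hTlt : pvTake L m (k' + 1) < 2 ^ i := pvTake_lt hi m _
        rw [show k' + 1 + 1 - 1 = k' + 1 from rfl, pv_clear_shift hT0 hTlt,
            ← ih hLp (by omega), show k' + 1 - 1 = k' from rfl]
    · rw [if_neg hb, if_neg hb]
      have : k < pvCnt L m := by simp [hb] at hk; omega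
      exact ih hLp this

theorem pvTake_iter_aux {w m : Nat} (hm : m < 2 ^ w) :
    ∀ d k, pvCnt (List.range w).reverse m = k + d →
      pvTake (List.range w).reverse m k = pvClear^[d] m := by
  intro d
  induction d with
  | zero => intro k hk; simpa using pvTake_all hm (by omega)
  | succ d ihd =>
    intro k hk
    have hpw : ((List.range w).reverse).Pairwise (· > ·) := by
      rw [List.pairwise_reverse]
      exact List.pairwise_lt_range
    rw [pvTake_clearstep hpw (by omega), ihd (k + 1) (by omega),
        ← Function.iterate_succ_apply' pvClear d m]

theorem pvTake_iter {w m k : Nat} (hm : m < 2 ^ w) (hk : k ≤ pvCnt (List.range w).reverse m) :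
    pvTake (List.range w).reverse m k
      = pvClear^[pvCnt (List.range w).reverse m - k] m := by
  have hd : pvCnt (List.range w).reverse m = k + (pvCnt (List.range w).reverse m - k) := by omega
  exact pvTake_iter_aux hm _ k hd

def pvFill2 : List Nat → Nat → Nat → Nat
  | [], x, _ => x
  | i :: L, x, c =>
    if c = 0 then x
    else if x &&& 2 ^ i = 0 then pvFill2 L (x ||| 2 ^ i) (c - 1)
    else pvFill2 L x c

theorem pv_set_bit (a i : Nat) :
    (2 ^ (i + 1) * a + (2 ^ i - 1)) ||| 2 ^ i = 2 ^ (i + 1) * a + (2 ^ (i + 1) - 1) := by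
  have h1 : (1:Nat) ≤ 2 ^ i := Nat.one_le_two_pow
  have hpi : (2:Nat) ^ i < 2 ^ (i+1) := by
    have := Nat.pow_lt_pow_right (a := 2) (by norm_num) (Nat.lt_succ_self i); omega
  apply Nat.eq_of_testBit_eq
  intro j
  rw [Nat.testBit_lor,
      Nat.testBit_two_pow_mul_add a (show 2^i - 1 < 2^(i+1) by omega),
      Nat.testBit_two_pow_mul_add a (show 2^(i+1) - 1 < 2^(i+1) by omega)]
  split
  · next hj =>
    rcases Nat.lt_trichotomy j i with hj2 | hj2 | hj2 <;>
      simp [Nat.testBit_two_pow, Nat.testBit_two_pow_sub_one, hj2] <;> omega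
  · next hj =>
    have : (2^i : Nat).testBit j = false := by
      simp [Nat.testBit_two_pow]
      omega
    simp [this]

theorem pvPc_low {i x : Nat} (h : x % 2 ^ i = 2 ^ i - 1) :
    pvPc x = pvPc (x / 2 ^ i) + i := by
  have hdm := Nat.div_add_mod x (2 ^ i)
  have h1 : (1:Nat) ≤ 2 ^ i := Nat.one_le_two_pow
  calc pvPc x = pvPc (2 ^ i * (x / 2 ^ i) + (2 ^ i - 1)) := by rw [← h, hdm]
    _ = pvPc (x / 2 ^ i) + pvPc (2 ^ i - 1) := pvPc_mul_add (by omega)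
    _ = pvPc (x / 2 ^ i) + i := by rw [pvPc_two_pow_sub_one]

theorem pv_low_decomp {i x : Nat} (h : x % 2 ^ i = 2 ^ i - 1) :
    (x.testBit i = false → ∃ a, x = 2 ^ (i + 1) * a + (2 ^ i - 1) ∧ x / 2 ^ i = 2 * a) ∧
    (x.testBit i = true → x % 2 ^ (i + 1) = 2 ^ (i + 1) - 1) := by
  have hdm := Nat.div_add_mod x (2 ^ i)
  have h1 : (1:Nat) ≤ 2 ^ i := Nat.one_le_two_pow
  have hq : x.testBit i = decide (x / 2 ^ i % 2 = 1) := Nat.testBit_eq_decide_div_mod_eq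
  constructor
  · intro hb
    rw [hb] at hq
    have heven : x / 2 ^ i % 2 = 0 := by
      have := of_decide_eq_false hq.symm
      omega
    refine ⟨x / 2 ^ i / 2, ?_, by omega⟩
    have hqq := Nat.div_add_mod (x / 2 ^ i) 2
    have hpow : (2:Nat) ^ (i + 1) * (x / 2 ^ i / 2) = 2 ^ i * (2 * (x / 2 ^ i / 2)) := by ring
    have hqe : x / 2 ^ i = 2 * (x / 2 ^ i / 2) := by omega
    rw [hqe] at hdm
    omega
  · intro hb
    rw [hb] at hq
    have hodd : x / 2 ^ i % 2 = 1 := by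
      have := of_decide_eq_true hq.symm
      omega
    have hqq := Nat.div_add_mod (x / 2 ^ i) 2
    have hmod : x % 2 ^ (i + 1) = x % 2 ^ i + 2 ^ i * (x / 2 ^ i % 2) := by
      rw [Nat.mod_pow_succ]
    rw [hmod, h, hodd]
    have : (2:Nat) ^ (i+1) = 2 * 2 ^ i := by ring
    omega

theorem pvFill2_iter {n : Nat} : ∀ (i x r : Nat), x % 2 ^ i = 2 ^ i - 1 → x < 2 ^ (i + n) →
    r + pvPc x ≤ i + n → pvFill2 (List.range' i n) x r = pvFill^[r] x := by
  induction n with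
  | zero =>
    intro i x r hlow hlt hbud
    have hpc : i ≤ pvPc x := by rw [pvPc_low hlow]; omega
    have hr : r = 0 := by omega
    simp [hr, pvFill2]
  | succ n ih =>
    intro i x r hlow hlt hbud
    rw [List.range'_succ]
    by_cases hr : r = 0
    · simp [pvFill2, hr]
    · have h1 : (1:Nat) ≤ 2 ^ i := Nat.one_le_two_pow
      have h1' : (1:Nat) ≤ 2 ^ (i + 1) := Nat.one_le_two_pow
      have hassoc : i + 1 + n = i + (n + 1) := by omega
      simp only [pvFill2, if_neg hr]
      by_cases hb : x.testBit i
      · have hand : ¬ (x &&& 2 ^ i = 0) := by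
          rw [Nat.and_two_pow, hb]
          simp
        rw [if_neg hand]
        have hlow' := (pv_low_decomp hlow).2 hb
        exact ih (i + 1) x r hlow' (by rw [hassoc]; exact hlt) (by omega)
      · have hand : x &&& 2 ^ i = 0 := by
          have hb' : x.testBit i = false := by simpa using hb
          rw [Nat.and_two_pow, hb']
          simp
        rw [if_pos hand]
        obtain ⟨a, hxa, _⟩ := (pv_low_decomp hlow).1 (by simpa using hb)
        have hset : x ||| 2 ^ i = 2 ^ (i + 1) * a + (2 ^ (i + 1) - 1) := by
          rw [hxa]; exact pv_set_bit a i
        have hfill : pvFill x = 2 ^ (i + 1) * a + (2 ^ (i + 1) - 1) := by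
          rw [hxa]; exact pv_fill_step a i
        have hpow : (2:Nat) ^ (i + 1) * 2 ^ n = 2 ^ (i + (n + 1)) := by
          rw [← pow_add, hassoc]
        have ha : a < 2 ^ n := by
          have hle : 2 ^ (i + 1) * a < 2 ^ (i + (n + 1)) := by omega
          rw [← hpow] at hle
          exact Nat.lt_of_mul_lt_mul_left hle
        have hxlt' : 2 ^ (i + 1) * a + (2 ^ (i + 1) - 1) < 2 ^ (i + 1 + n) := by
          have hmul : 2 ^ (i + 1) * (a + 1) ≤ 2 ^ (i + 1) * 2 ^ n :=
            Nat.mul_le_mul_left _ (by omega)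
          rw [Nat.mul_succ] at hmul
          rw [hpow] at hmul
          rw [hassoc]
          omega
        have hlow' : (2 ^ (i + 1) * a + (2 ^ (i + 1) - 1)) % 2 ^ (i + 1) = 2 ^ (i + 1) - 1 := by
          rw [Nat.mul_add_mod, Nat.mod_eq_of_lt (by omega)]
        have hpcx : pvPc x = pvPc a + i := by
          rw [hxa, pvPc_mul_add (by omega), pvPc_two_pow_sub_one]
        have hpc' : pvPc (2 ^ (i + 1) * a + (2 ^ (i + 1) - 1)) = pvPc x + 1 := by
          rw [pvPc_mul_add (by omega), pvPc_two_pow_sub_one, hpcx]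
          omega
        rw [hset, ih (i + 1) _ (r - 1) hlow' hxlt' (by omega), ← hfill,
            ← Function.iterate_succ_apply pvFill (r - 1) x,
            show (r - 1).succ = r by omega]
-- second loop of A: `for i in range(32): if count1 == 0: break; if not (x & (1<<i)): x |= (1<<i); count1 -= 1`
-- (the break is the `if c = 0 then x` branch; 1 << i is (1 : Int) <<< i.toNat, exact since i ≥ 0)
theorem pv_shift_eq (n : Nat) : (1 : Int) <<< ((n : Nat) : Int) = ((2 ^ n : Nat) : Int) := by
  rw [Int.shiftLeft_natCast_right]
  simp [Int.shiftLeft_eq]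

theorem pv_shift_eq' (n : Nat) : (1 : Int) <<< n = ((2 ^ n : Nat) : Int) := by
  simp [Int.shiftLeft_eq]

theorem pv_m_nonneg (num1 : Int) : 0 ≤ PySem.Int.band num1 4294967295 := by
  rw [PySem.Int.band_comm]
  exact PySem.Int.band_nonneg_of_nonneg_left num1 (by norm_num)

theorem pv_m_neg_case (num1 : Int) (h : ¬ 0 ≤ num1) :
    PySem.Int.band num1 4294967295
      = ((2 ^ 32 - 1 - ((-num1 - 1).toNat % 2 ^ 32) : Nat) : Int) := by
  rw [PySem.Int.band, if_neg h, if_pos (by norm_num : (0:Int) ≤ 4294967295),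
      show (4294967295:Int).toNat = 2 ^ 32 - 1 from rfl,
      Nat.land_comm, Nat.and_two_pow_sub_one_eq_mod]

theorem pv_m_pos_case (num1 : Int) (h : 0 ≤ num1) :
    PySem.Int.band num1 4294967295 = ((num1.toNat % 2 ^ 32 : Nat) : Int) := by
  rw [PySem.Int.band, if_pos h, if_pos (by norm_num : (0:Int) ≤ 4294967295),
      show (4294967295:Int).toNat = 2 ^ 32 - 1 from rfl,
      Nat.and_two_pow_sub_one_eq_mod]

theorem pv_m_lt (num1 : Int) : (PySem.Int.band num1 4294967295).toNat < 2 ^ 32 := by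
  by_cases h : 0 ≤ num1
  · rw [pv_m_pos_case num1 h, Int.toNat_natCast]
    exact Nat.mod_lt _ (by norm_num)
  · rw [pv_m_neg_case num1 h, Int.toNat_natCast]
    omega

theorem pv_bit_bridge (num1 : Int) {i : Nat} (hi : i < 32) :
    (PySem.Int.band num1 ((1 : Int) <<< ((i : Nat) : Int)) ≠ 0) ↔
      (PySem.Int.band num1 4294967295).toNat.testBit i = true := by
  rw [pv_shift_eq]
  by_cases h : 0 ≤ num1
  · rw [pv_m_pos_case num1 h, Int.toNat_natCast,
        PySem.Int.band, if_pos h, if_pos (by positivity)]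
    rw [Int.toNat_natCast, Nat.and_two_pow, Nat.testBit_mod_two_pow]
    cases hb : num1.toNat.testBit i <;> simp [hb, hi]
  · rw [pv_m_neg_case num1 h, Int.toNat_natCast,
        PySem.Int.band, if_neg h, if_pos (by positivity)]
    rw [Int.toNat_natCast, Nat.two_pow_and,
        pv_compl_testBit (Nat.mod_lt _ (by norm_num)) hi,
        Nat.testBit_mod_two_pow]
    cases hb : (-num1 - 1).toNat.testBit i <;> simp [hb, hi]

theorem pv_bitCount_natAbs (n : Int) : PySem.Int.bitCount n = pvPc n.natAbs := by
  by_cases h : 0 ≤ n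
  · rw [pvPc, show ((n.natAbs : Nat) : Int) = n by omega]
  · rw [pvPc, ← PySem.Int.bitCount_neg, show ((n.natAbs : Nat) : Int) = -n by omega]

theorem pvPc_lt_pow {w n : Nat} (h : n < 2 ^ w) : pvPc n ≤ w := by
  induction w generalizing n with
  | zero => interval_cases n; simp [pvPc_zero]
  | succ w ih =>
    by_cases hn : n = 0
    · simp [hn, pvPc_zero]
    · rw [pvPc_rec (by omega)]
      have h2 : (2:Nat) ^ (w + 1) = 2 * 2 ^ w := by ring
      have := ih (n := n / 2) (by omega)
      omega

theorem pvPc_le_31 {n : Nat} (h : n ≤ 2 ^ 31) : pvPc n ≤ 31 := by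
  rcases eq_or_lt_of_le h with he | hlt
  · rw [he, show (2:Nat) ^ 31 = 2 ^ 31 * 1 + 0 by ring, pvPc_mul_add (by positivity)]
    rw [show pvPc 1 = 1 from by decide, pvPc_zero]
    omega
  · exact pvPc_lt_pow hlt

theorem pv_loop1_bridge (num1 : Int) : ∀ (L : List Nat), (∀ j ∈ L, j < 32) → ∀ (x c : Nat),
    List.foldl
      (fun (st : Int × Int) i =>
        if PySem.Int.band num1 ((1 : Int) <<< i.toNat) ≠ 0 then
          (if st.2 > 0 then (PySem.Int.bor st.1 ((1 : Int) <<< i.toNat), st.2 - 1) else st)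
        else st) (((x : Nat) : Int), ((c : Nat) : Int)) (List.map (fun n : Nat => (n : Int)) L)
      = ((((x ||| pvTake L (PySem.Int.band num1 4294967295).toNat c : Nat)) : Int),
          (((c - pvCnt L (PySem.Int.band num1 4294967295).toNat : Nat)) : Int)) := by
  intro L
  induction L with
  | nil => intro _ x c; simp [pvTake, pvCnt]
  | cons i L ih =>
    intro hL x c
    have hi : i < 32 := hL i (by simp)
    have hL' : ∀ j ∈ L, j < 32 := fun j hj => hL j (by simp [hj])
    have hcond : (PySem.Int.band num1 ((1 : Int) <<< ((((i : Nat) : Int)).toNat : Int)) ≠ 0) ↔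
        (PySem.Int.band num1 4294967295).toNat.testBit i = true := by
      simp only [Int.toNat_natCast]
      exact pv_bit_bridge num1 hi
    simp only [List.map_cons, List.foldl_cons]
    by_cases hb : (PySem.Int.band num1 4294967295).toNat.testBit i
    · rw [if_pos (hcond.mpr hb)]
      by_cases hc : 0 < c
      · rw [if_pos (show ((c : Nat) : Int) > 0 from by exact_mod_cast hc)]
        simp only [Int.toNat_natCast]
        rw [pv_shift_eq, PySem.Int.bor_natCast,
            show ((c : Int) - 1) = ((c - 1 : Nat) : Int) from by omega,
            ih hL' (x ||| 2 ^ i) (c - 1)]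
        simp only [pvTake, pvCnt_cons, hb, if_pos hc]
        rw [Nat.lor_assoc, show c - 1 - pvCnt L (PySem.Int.band num1 4294967295).toNat
              = c - (pvCnt L (PySem.Int.band num1 4294967295).toNat + 1) from by omega]
        simp
      · rw [if_neg (show ¬ (((c : Nat) : Int) > 0) from by exact_mod_cast hc)]
        rw [ih hL' x c]
        simp only [pvTake, pvCnt_cons, hb]
        rw [if_neg hc, show c - pvCnt L (PySem.Int.band num1 4294967295).toNat
              = c - (pvCnt L (PySem.Int.band num1 4294967295).toNat + 1) from by omega]
        simp
    · rw [if_neg (show ¬ (PySem.Int.band num1 ((1 : Int) <<< ((((i : Nat) : Int)).toNat : Int)) ≠ 0) from by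
        simp only [hcond]; simp [hb])]
      rw [ih hL' x c]
      simp [pvTake, pvCnt_cons, hb]

theorem pv_loop2_bridge : ∀ (L : List Nat) (x c : Nat),
    minimizeXorLoop2 (List.map (fun n : Nat => (n : Int)) L) ((x : Nat) : Int) ((c : Nat) : Int)
      = ((pvFill2 L x c : Nat) : Int) := by
  intro L
  induction L with
  | nil => intro x c; simp [minimizeXorLoop2, pvFill2]
  | cons i L ih =>
    intro x c
    simp only [List.map_cons, minimizeXorLoop2, Int.toNat_natCast, pvFill2]
    rw [pv_shift_eq', PySem.Int.band_natCast, PySem.Int.bor_natCast]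
    by_cases hc : c = 0
    · simp [hc]
    · rw [if_neg (show ¬ ((c : Nat) : Int) = 0 from by exact_mod_cast hc), if_neg hc]
      by_cases hz : x &&& 2 ^ i = 0
      · rw [if_pos (show ((x &&& 2 ^ i : Nat) : Int) = 0 from by exact_mod_cast hz), if_pos hz,
            show ((c : Int) - 1) = ((c - 1 : Nat) : Int) from by omega, ih]
      · rw [if_neg (show ¬ ((x &&& 2 ^ i : Nat) : Int) = 0 from by exact_mod_cast hz), if_neg hz, ih]

theorem pv_clear_band (x : Nat) :
    PySem.Int.band ((x : Nat) : Int) (((x : Nat) : Int) - 1) = ((pvClear x : Nat) : Int) := by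
  cases x with
  | zero =>
    show PySem.Int.band 0 (0 - 1) = _
    rw [PySem.Int.band_comm]
    simp [pvClear, PySem.Int.band_neg_one]
  | succ n =>
    rw [show (((n + 1 : Nat) : Int)) - 1 = ((n : Nat) : Int) by push_cast; ring,
        PySem.Int.band_natCast]
    rfl

theorem pv_clear_bridge_gt : ∀ (d : Nat) (x k : Nat),
    minimizeXorClear ((x : Nat) : Int) (((k + d : Nat)) : Int) ((k : Nat) : Int)
      = (((pvClear^[d] x : Nat) : Int), ((k : Nat) : Int)) := by
  intro d
  induction d with
  | zero =>
    intro x k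
    rw [minimizeXorClear, dif_neg (by omega)]
    simp
  | succ d ih =>
    intro x k
    rw [minimizeXorClear, dif_pos (by push_cast; omega), pv_clear_band,
        show (((k + (d + 1) : Nat) : Int)) - 1 = ((k + d : Nat) : Int) by push_cast; ring,
        ih (pvClear x) k, Function.iterate_succ_apply]

theorem pv_clear_bridge (x c k : Nat) :
    minimizeXorClear ((x : Nat) : Int) ((c : Nat) : Int) ((k : Nat) : Int)
      = (((pvClear^[c - k] x : Nat) : Int), ((min c k : Nat) : Int)) := by
  rcases Nat.le_total c k with h | h
  · rw [minimizeXorClear, dif_neg (by omega), show c - k = 0 by omega,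
        show min c k = c by omega]
    rfl
  · obtain ⟨d, hd⟩ : ∃ d, c = k + d := ⟨c - k, by omega⟩
    subst hd
    rw [pv_clear_bridge_gt d x k, show k + d - k = d by omega, show min (k + d) k = k by omega]

theorem pvPc_two_pow (i : Nat) : pvPc (2 ^ i) = 1 := by
  rw [show (2:Nat) ^ i = 2 ^ i * 1 + 0 by ring, pvPc_mul_add (by positivity), pvPc_zero,
      show pvPc 1 = 1 from by decide]

theorem pvClear_props {x : Nat} (h0 : x ≠ 0) : pvPc (pvClear x) = pvPc x - 1 ∧ pvClear x ≤ x := by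
  obtain ⟨a, i, hxa⟩ := pv_decomp_lsb h0
  have h1 : (1:Nat) ≤ 2 ^ i := Nat.one_le_two_pow
  have hA : pvPc (2 ^ (i + 1) * a + 2 ^ i) = pvPc a + 1 := by
    rw [pvPc_mul_add
          (by have := Nat.pow_lt_pow_right (a := 2) (by norm_num) (Nat.lt_succ_self i); omega),
        pvPc_two_pow]
  have hB : pvPc (2 ^ (i + 1) * a) = pvPc a := by
    rw [show (2:Nat) ^ (i + 1) * a = 2 ^ (i + 1) * a + 0 by ring,
        pvPc_mul_add (by positivity), pvPc_zero]
    omega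
  rw [hxa, pv_clear_step, hA, hB]
  constructor
  · omega
  · omega

theorem pvClear_iter_props : ∀ (d : Nat) {x : Nat}, d ≤ pvPc x →
    pvPc (pvClear^[d] x) = pvPc x - d ∧ pvClear^[d] x ≤ x := by
  intro d
  induction d with
  | zero => intro x _; simp
  | succ d ih =>
    intro x hd
    have h0 : x ≠ 0 := by
      intro hx
      rw [hx] at hd
      rw [pvPc_zero] at hd
      omega
    obtain ⟨hpc, hle⟩ := pvClear_props h0
    rw [Function.iterate_succ_apply]
    obtain ⟨hpc', hle'⟩ := ih (x := pvClear x) (by omega)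
    exact ⟨by omega, le_trans hle' hle⟩

theorem pv_fill_bor (x : Nat) :
    PySem.Int.bor ((x : Nat) : Int) (((x : Nat) : Int) + 1) = ((pvFill x : Nat) : Int) := by
  rw [show (((x : Nat) : Int)) + 1 = ((x + 1 : Nat) : Int) by push_cast; ring,
      PySem.Int.bor_natCast]
  rfl

theorem pvFill_props {x : Nat} (hlt : x < 2 ^ 32) (hne : x ≠ 2 ^ 32 - 1) :
    pvPc (pvFill x) = pvPc x + 1 ∧ pvFill x < 2 ^ 32 := by
  obtain ⟨a, i, hi, hxa⟩ := pv_decomp_lowzero hlt hne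
  have h1 : (1:Nat) ≤ 2 ^ i := Nat.one_le_two_pow
  have h1' : (1:Nat) ≤ 2 ^ (i + 1) := Nat.one_le_two_pow
  have hpow : (2:Nat) ^ (i + 1) * 2 ^ (31 - i) = 2 ^ 32 := by
    rw [← pow_add]; congr 1; omega
  have ha : a < 2 ^ (31 - i) := by
    by_contra hcon
    have : 2 ^ (i + 1) * 2 ^ (31 - i) ≤ 2 ^ (i + 1) * a :=
      Nat.mul_le_mul_left _ (by omega)
    rw [hpow] at this
    omega
  have hb : 2 ^ (i + 1) * (a + 1) ≤ 2 ^ (i + 1) * 2 ^ (31 - i) :=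
    Nat.mul_le_mul_left _ (by omega)
  rw [Nat.mul_succ] at hb
  rw [hpow] at hb
  constructor
  · rw [hxa, pv_fill_step, pvPc_mul_add (by omega), pvPc_mul_add (by omega),
        pvPc_two_pow_sub_one, pvPc_two_pow_sub_one]
    omega
  · rw [hxa, pv_fill_step]
    omega

theorem pv_fill_bridge_aux : ∀ (d : Nat) (x c k : Nat), k = c + d → pvPc x = c → k ≤ 31 →
    x < 2 ^ 32 →
    minimizeXorFill ((x : Nat) : Int) ((c : Nat) : Int) ((k : Nat) : Int)
      = ((pvFill^[d] x : Nat) : Int) := by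
  intro d
  induction d with
  | zero =>
    intro x c k hk hpc hk31 hx
    rw [minimizeXorFill, dif_neg (by push_cast; omega)]
    simp
  | succ d ih =>
    intro x c k hk hpc hk31 hx
    have hne : x ≠ 2 ^ 32 - 1 := by
      intro hcon
      rw [hcon, pvPc_two_pow_sub_one] at hpc
      omega
    obtain ⟨hpc', hlt'⟩ := pvFill_props hx hne
    rw [minimizeXorFill, dif_pos (by
          constructor
          · push_cast; omega
          · show ¬ (((x : Nat) : Int) = 4294967295)
            rw [show ((4294967295:Int)) = (((2 ^ 32 - 1 : Nat) : Nat) : Int) by norm_num]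
            exact_mod_cast hne),
        pv_fill_bor,
        show (((c : Nat) : Int)) + 1 = ((c + 1 : Nat) : Int) by push_cast; ring,
        ih (pvFill x) (c + 1) k (by omega) (by omega) hk31 hlt',
        Function.iterate_succ_apply]

theorem pvFill2_zero (L : List Nat) (x : Nat) : pvFill2 L x 0 = x := by
  cases L <;> simp [pvFill2]

theorem pv_main (num1 num2 : Int) (h2 : num2.natAbs ≤ 2 ^ 31) :
    minimizeXor num1 num2 = minimizeXor_alt num1 num2 := by
  have hm0 : 0 ≤ PySem.Int.band num1 4294967295 := pv_m_nonneg num1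
  have hmc : PySem.Int.band num1 4294967295
      = (((PySem.Int.band num1 4294967295).toNat : Nat) : Int) := by omega
  have hmlt : (PySem.Int.band num1 4294967295).toNat < 2 ^ 32 := pv_m_lt num1
  have hk31 : pvPc num2.natAbs ≤ 31 := pvPc_le_31 h2
  have hbc2 : PySem.Int.bitCount num2 = pvPc num2.natAbs := pv_bitCount_natAbs num2
  have hcnt : pvCnt ((List.range 32).reverse) (PySem.Int.band num1 4294967295).toNat
      = pvPc (PySem.Int.band num1 4294967295).toNat := by
    rw [pvCnt, List.countP_reverse, ← pvPc_countP_range hmlt]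
  have hdesc : PySem.List.pyRange 31 (-1) (-1)
      = List.map (fun n : Nat => (n : Int)) ((List.range 32).reverse) := by decide
  have hasc : PySem.List.pyRange 0 32 1
      = List.map (fun n : Nat => (n : Int)) (List.range' 0 32) := by decide
  have hLdesc : ∀ j ∈ (List.range 32).reverse, j < 32 := by
    intro j hj
    rw [List.mem_reverse, List.mem_range] at hj
    exact hj
  simp only [minimizeXor, minimizeXor_alt]
  have hb1 := pv_loop1_bridge num1 ((List.range 32).reverse) hLdesc 0 (pvPc num2.natAbs)
  rw [Nat.cast_zero] at hb1
  rw [hdesc, hbc2, hasc, hb1]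
  simp only
  rw [pv_loop2_bridge (List.range' 0 32), Nat.zero_or, hcnt]
  -- B side
  rw [hmc]
  simp only [Int.toNat_natCast]
  rw [show PySem.Int.bitCount (((PySem.Int.band num1 4294967295).toNat : Nat) : Int)
        = pvPc (PySem.Int.band num1 4294967295).toNat from rfl,
      pv_clear_bridge (PySem.Int.band num1 4294967295).toNat
        (pvPc (PySem.Int.band num1 4294967295).toNat) (pvPc num2.natAbs)]
  simp only
  rcases Nat.le_total (pvPc (PySem.Int.band num1 4294967295).toNat) (pvPc num2.natAbs) with
    hck | hck
  · -- c ≤ k : A keeps every set bit, both sides fill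
    rw [show pvPc (PySem.Int.band num1 4294967295).toNat - pvPc num2.natAbs = 0 by omega]
    rw [show min (pvPc (PySem.Int.band num1 4294967295).toNat) (pvPc num2.natAbs)
          = pvPc (PySem.Int.band num1 4294967295).toNat by omega]
    rw [Function.iterate_zero_apply]
    rw [pvTake_all hmlt (by omega)]
    rw [pv_fill_bridge_aux (pvPc num2.natAbs - pvPc (PySem.Int.band num1 4294967295).toNat)
          _ _ _ (by omega) rfl hk31 hmlt]
    rw [pvFill2_iter 0 _ _ (by omega) (by simpa using hmlt) (by simp; omega)]
  · -- k ≤ c : both sides clear, no filling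
    rw [show min (pvPc (PySem.Int.band num1 4294967295).toNat) (pvPc num2.natAbs)
          = pvPc num2.natAbs by omega]
    rw [pvTake_iter hmlt (by omega), hcnt,
        show pvPc num2.natAbs - pvPc (PySem.Int.band num1 4294967295).toNat = 0 by omega,
        pvFill2_zero]
    obtain ⟨hpc', _⟩ := pvClear_iter_props
      (pvPc (PySem.Int.band num1 4294967295).toNat - pvPc num2.natAbs) (x := (PySem.Int.band num1 4294967295).toNat) (by omega)
    rw [pv_fill_bridge_aux 0 _ _ _ (by omega) (by rw [hpc']; omega) hk31
          (lt_of_le_of_lt (pvClear_iter_props _ (by omega : pvPc (PySem.Int.band num1 4294967295).toNat - pvPc num2.natAbs ≤ pvPc (PySem.Int.band num1 4294967295).toNat)).2 hmlt),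
        Function.iterate_zero_apply]

-- ===== VERDICT (by name: the statement is the Claim_ definition above) =====
theorem minimizeXor_spec : Claim_equal_minimizeXor := by
  intro num1 num2 hdom
  unfold Dom_minimizeXor pvDomInt at hdom
  simp only [Bool.and_eq_true, decide_eq_true_eq] at hdom
  unfold Spec_minimizeXor
  exact pv_main num1 num2 (by omega)
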